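-- pv_equiv track=rewrite | github.com/AidanFRyan/AWITH_ATEETHA | django/hardware/searcher.py | trimPrice
-- ===== SOURCE A (Python) =====
-- def trimPrice(p):
--     s = ''
--     for i in p:
--         if i.isdigit() or i == '.':
--             s = s + i
--         elif i == ',':
--             continue
--         else:
--             break
--     return s
-- ===== SOURCE B (Python) =====
-- def trimPrice(p):
--     n = 0
--     while n < len(p) and (p[n].isdigit() or p[n] in '.,'):
--         n += 1
--     return p[:n].replace(',', '')
-- ===== Notes on version B (the rewrite author's own statement) =====
-- stated objective: idiomatic
-- what changed: B first computes the boundary index of the leading run of [0-9.,] with an index loop, then returns the slice with commas removed via replace, instead of A's single character-by-character accumulator loop with skip/break branches.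
import Mathlib
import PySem

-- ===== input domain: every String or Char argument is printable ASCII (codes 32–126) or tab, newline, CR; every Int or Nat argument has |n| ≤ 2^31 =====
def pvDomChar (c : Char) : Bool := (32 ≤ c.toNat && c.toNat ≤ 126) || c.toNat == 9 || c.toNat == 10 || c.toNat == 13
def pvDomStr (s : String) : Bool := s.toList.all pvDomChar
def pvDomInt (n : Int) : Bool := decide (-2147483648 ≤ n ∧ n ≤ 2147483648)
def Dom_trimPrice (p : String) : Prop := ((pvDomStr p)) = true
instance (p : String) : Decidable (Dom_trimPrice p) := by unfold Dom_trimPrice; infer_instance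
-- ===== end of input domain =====

-- B computes the boundary index of the leading [0-9.,] run, then slices and strips commas; A accumulates char by char with skip/break. Idiomatic restructuring, same cost.
-- ===== PORT A =====
-- A's loop: append digits/'.', skip ',', break otherwise (accumulator s)
def trimPriceLoop (s : List Char) (cs : List Char) : List Char :=
  match cs with
  | [] => s
  | i :: rest =>
    if i.isDigit || i = '.' then trimPriceLoop (s ++ [i]) rest
    else if i = ',' then trimPriceLoop s rest
    else s

def trimPrice (p : String) : String := String.mk (trimPriceLoop [] p.toList)

-- ===== PORT B =====
-- B's while loop: length of the leading run of chars in "0123456789.,"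
def trimScan (cs : List Char) : Nat :=
  match cs with
  | [] => 0
  | c :: rest => if c.isDigit || c = '.' || c = ',' then trimScan rest + 1 else 0

-- p[:n].replace(',', '')
def trimPrice_alt (p : String) : String :=
  String.mk ((p.toList.take (trimScan p.toList)).filter (fun c => c != ','))

-- ===== PRECONDITION & SPEC =====
def Spec_trimPrice (p : String) (out : String) : Prop := out = trimPrice_alt p
instance (p : String) (out : String) : Decidable (Spec_trimPrice p out) := by unfold Spec_trimPrice; infer_instance

-- ===== CLAIM (what is proved, stated in full; the proofs are below) =====
def Claim_equal_trimPrice : Prop := ∀ (p : String), Dom_trimPrice p → Spec_trimPrice p (trimPrice p)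

-- ===== LEMMAS AND PROOFS =====

-- ===== VERDICT (by name: the statement is the Claim_ definition above) =====
lemma trimPriceLoop_eq (cs : List Char) : ∀ s : List Char,
    trimPriceLoop s cs = s ++ (cs.take (trimScan cs)).filter (fun c => c != ',') := by
  induction cs with
  | nil => intro s; simp [trimPriceLoop, trimScan]
  | cons c rest ih =>
    intro s
    by_cases hd : c.isDigit || c = '.'
    · have hk : (c.isDigit || c = '.' || c = ',') = true := by
        simp only [Bool.or_eq_true] at hd ⊢; tauto
      have hne : (c != ',') = true := by
        rcases Bool.or_eq_true _ _ |>.mp hd with h | h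
        · simp only [bne_iff_ne]; intro h'; subst h'; simp [Char.isDigit] at h
        · simp only [decide_eq_true_eq] at h; subst h; decide
      simp [trimPriceLoop, trimScan, hd, hne, ih]
    · by_cases hc : c = ','
      · subst hc
        simp [trimPriceLoop, trimScan, ih]
      · have hk : (c.isDigit || c = '.' || c = ',') = false := by
          simp only [Bool.or_eq_true, not_or, Bool.not_eq_true, decide_eq_true_eq] at hd
          simp [hd.1, hd.2, hc]
        simp [trimPriceLoop, trimScan, hd, hc]

theorem trimPrice_spec : Claim_equal_trimPrice := by
  intro p _
  unfold Spec_trimPrice trimPrice trimPrice_alt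
  rw [trimPriceLoop_eq]
  simp
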